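-- pv_equiv track=rewrite | github.com/fanfanda/ijcai_2018 | round2_utility.py | after_times
-- ===== SOURCE A (Python) =====
-- def after_times(x):
--     s = x.split(':')
--     t = int(s[0])
--     result = 0
--     for i in range(len(s)-1,0,-1):
--         if 0 < (int(s[i]) - t):
--             if (int(s[i]) - t) <= 900:
--                 result += 1
--         else:
--             return result
--     return result
-- ===== SOURCE B (Python) =====
-- def after_times(x):
--     vals = [int(v) for v in x.split(':')]
--     t = vals[0]
--     diffs = [v - t for v in vals[1:]]
--     cut = 0
--     for i, d in enumerate(diffs):
--         if d <= 0:
--             cut = i + 1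
--     return sum(1 for d in diffs[cut:] if d <= 900)
-- ===== Notes on version B (the rewrite author's own statement) =====
-- stated objective: alternative
-- what changed: A scans the fields backwards with an early return, counting as it goes; B parses all fields eagerly, finds the last non-positive difference with a forward scan, and then counts the in-range values in the remaining suffix.
-- outside the precondition, e.g. on after_times('0:x:-1:5'): A returns 1, B raises ValueError
import Mathlib
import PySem

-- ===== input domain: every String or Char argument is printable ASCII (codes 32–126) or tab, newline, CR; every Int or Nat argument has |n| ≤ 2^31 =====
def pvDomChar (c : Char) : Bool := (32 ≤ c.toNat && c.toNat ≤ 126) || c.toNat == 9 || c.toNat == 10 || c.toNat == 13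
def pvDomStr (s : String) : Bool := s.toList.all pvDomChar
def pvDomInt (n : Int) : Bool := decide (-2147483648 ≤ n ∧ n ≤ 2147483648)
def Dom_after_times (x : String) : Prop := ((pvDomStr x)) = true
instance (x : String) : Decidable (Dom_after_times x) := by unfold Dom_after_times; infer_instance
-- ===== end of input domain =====

-- B replaces A's early-returning backward index loop by an eager parse, a forward scan for the
-- last non-positive difference, and a count over the remaining suffix (objective: alternative).

-- ===== PORT A =====
-- the backward index loop; `none` = a raise (unparseable field / bad index)
def atLoopA (s : List String) (t : Int) : List Int → Int → Option Int
  | [], result => some result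
  | i :: is, result =>
    match PySem.List.pyGet? s i with
    | none => none
    | some v =>
      match PySem.Int.ofStr? v with
      | none => none
      | some n =>
        if 0 < n - t then
          (if n - t ≤ 900 then atLoopA s t is (result + 1) else atLoopA s t is result)
        else some result

def after_timesAux (x : String) : Option Int :=
  let s := (PySem.Str.split? x ":").getD []
  match PySem.List.pyGet? s 0 with
  | none => none
  | some s0 =>
    match PySem.Int.ofStr? s0 with
    | none => none
    | some t => atLoopA s t (PySem.List.pyRange ((s.length : Int) - 1) 0 (-1)) 0

def after_times (x : String) : Int := (after_timesAux x).getD 0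

-- ===== PORT B =====
-- [int(v) for v in …]: `none` = ValueError on some field
def atParseAll : List String → Option (List Int)
  | [] => some []
  | v :: vs =>
    match PySem.Int.ofStr? v, atParseAll vs with
    | some n, some ns => some (n :: ns)
    | _, _ => none

def after_timesAltAux (x : String) : Option Int :=
  match atParseAll ((PySem.Str.split? x ":").getD []) with
  | none => none
  | some vals =>
    match PySem.List.pyGet? vals 0 with
    | none => none
    | some t =>
      let diffs := (PySem.List.slice vals (some 1) none).map (fun v => v - t)
      let cut := (PySem.List.enumerate diffs).foldl
        (fun (c : Int) (p : Int × Int) => if p.2 ≤ 0 then p.1 + 1 else c) 0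
      some ((PySem.List.slice diffs (some cut) none).foldl
        (fun (acc : Int) (d : Int) => if d ≤ 900 then acc + 1 else acc) 0)

def after_times_alt (x : String) : Int := (after_timesAltAux x).getD 0

-- ===== PRECONDITION & SPEC =====
-- Pre_ excludes strings with a field that does not parse as an int: there Python A raises, except
-- when its backward scan stops before reaching the bad field (then A returns while B, which parses
-- every field eagerly, raises ValueError).
def Pre_after_times (x : String) : Prop :=
  ∀ v ∈ (PySem.Str.split? x ":").getD [], (PySem.Int.ofStr? v).isSome = true
instance (x : String) : Decidable (Pre_after_times x) := by unfold Pre_after_times; infer_instance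

def pvWitness_after_times : String := "100:950:1100:300"

def Spec_after_times (x : String) (out : Int) : Prop := out = after_times_alt x
instance (x : String) (out : Int) : Decidable (Spec_after_times x out) := by
  unfold Spec_after_times; infer_instance

-- ===== CLAIM (what is proved, stated in full; the proofs are below) =====
def Claim_equal_after_times : Prop :=
  ∀ (x : String), Dom_after_times x → Pre_after_times x → Spec_after_times x (after_times x)

-- ===== LEMMAS AND PROOFS =====

-- the parsed value of a field (under Pre_, ofStr? is some, so getD is exact)
def atVal (v : String) : Int := (PySem.Int.ofStr? v).getD 0

lemma atParseAll_eq_some (l : List String)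
    (h : ∀ v ∈ l, (PySem.Int.ofStr? v).isSome = true) :
    atParseAll l = some (l.map atVal) := by
  induction l with
  | nil => rfl
  | cons v vs ih =>
    have hv := h v (by simp)
    obtain ⟨n, hn⟩ := Option.isSome_iff_exists.mp hv
    simp only [atParseAll, hn, ih (fun w hw => h w (by simp [hw]))]
    simp [atVal, hn]

-- pure form of A's loop over the (reversed) difference list
def atCount : List Int → Int → Int
  | [], r => r
  | d :: ds, r => if 0 < d then atCount ds (r + if d ≤ 900 then 1 else 0) else r

lemma atCount_spec (l : List Int) (r : Int) :
    atCount l r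
      = r + (List.countP (fun d => decide (d ≤ 900))
              (l.takeWhile (fun d => decide (0 < d))) : Nat) := by
  induction l generalizing r with
  | nil => simp [atCount]
  | cons d ds ih =>
    by_cases hd : 0 < d
    · simp only [atCount, ih, List.takeWhile_cons, hd, decide_true]
      by_cases h9 : d ≤ 900
      · simp [h9]; ring
      · simp [h9]
    · simp [atCount, hd]

lemma atLoopA_eq (s0 : String) (rest : List String) (t : Int)
    (h : ∀ v ∈ rest, (PySem.Int.ofStr? v).isSome = true)
    (k : Nat) (hk : k ≤ rest.length) (r : Int) :
    atLoopA (s0 :: rest) t (PySem.List.pyRange (k : Int) 0 (-1)) r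
      = some (atCount (((rest.map (fun v => atVal v - t)).take k).reverse) r) := by
  induction k generalizing r with
  | zero => simp [PySem.List.pyRange_neg_one_eq_nil, atLoopA, atCount]
  | succ k ih =>
    have hk' : k < rest.length := by omega
    rw [show ((k+1 : Nat) : Int) = ((k : Int) + 1) by push_cast; ring]
    rw [PySem.List.pyRange_neg_one_cons (by positivity)]
    have hcons : ((k : Int) + 1) - 1 = (k : Int) := by ring
    have hget : PySem.List.pyGet? (s0 :: rest) ((k : Int) + 1) = some rest[k] := by
      rw [show ((k : Int) + 1) = ((k+1 : Nat) : Int) by push_cast; ring,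
        PySem.List.pyGet?_natCast]
      simp [hk']
    have hv := h rest[k] (by simp)
    obtain ⟨n, hn⟩ := Option.isSome_iff_exists.mp hv
    have hval : atVal rest[k] = n := by simp [atVal, hn]
    have htake : ((rest.map (fun v => atVal v - t)).take (k+1)).reverse
        = (atVal rest[k] - t) :: ((rest.map (fun v => atVal v - t)).take k).reverse := by
      rw [List.take_add_one]
      have : (rest.map (fun v => atVal v - t))[k]? = some (atVal rest[k] - t) := by
        simp [hk']
      simp [this]
    simp only [atLoopA, hget, hn, hcons, htake, hval, atCount]
    by_cases hpos : 0 < n - t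
    · simp only [if_pos hpos]
      by_cases h9 : n - t ≤ 900
      · simp only [if_pos h9, ih hk'.le]
      · simp only [if_neg h9, ih hk'.le, add_zero]
    · simp only [if_neg hpos]

-- the forward scan for the last non-positive difference computes len − len(takeWhile pos ∘ reverse)
lemma atCut_eq (l : List Int) :
    (PySem.List.enumerate l).foldl (fun (c : Int) (p : Int × Int) => if p.2 ≤ 0 then p.1 + 1 else c) 0
      = ((l.length - (l.reverse.takeWhile (fun d => decide (0 < d))).length : Nat) : Int) := by
  induction l using List.reverseRecOn with
  | nil => simp [PySem.List.enumerate]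
  | append_singleton l d ih =>
    rw [PySem.List.enumerate_append, List.foldl_append, ih]
    have hle : (l.reverse.takeWhile (fun d => decide (0 < d))).length ≤ l.length := by
      have := (List.takeWhile_prefix (l := l.reverse) (fun d => decide (0 < d))).length_le
      simpa using this
    by_cases hd : d ≤ 0
    · have htw : ((l ++ [d]).reverse.takeWhile (fun d => decide (0 < d))) = [] := by
        simp [show ¬ (0 < d) by omega]
      simp only [htw, PySem.List.enumerate_cons, PySem.List.enumerate_nil, List.foldl_cons,
        List.foldl_nil, if_pos hd, List.length_append, List.length_cons, List.length_nil]
      omega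
    · have htw : ((l ++ [d]).reverse.takeWhile (fun d => decide (0 < d)))
          = d :: (l.reverse.takeWhile (fun d => decide (0 < d))) := by
        simp [show (0:Int) < d by omega]
      simp only [htw, PySem.List.enumerate_cons, PySem.List.enumerate_nil, List.foldl_cons,
        List.foldl_nil, if_neg hd, List.length_append, List.length_cons, List.length_nil]
      omega

-- dropping cut elements leaves exactly the reversed positive suffix
lemma atDrop_eq (l : List Int) :
    l.drop (l.length - (l.reverse.takeWhile (fun d => decide (0 < d))).length)
      = (l.reverse.takeWhile (fun d => decide (0 < d))).reverse := by
  set p : Int → Bool := fun d => decide (0 < d) with hp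
  set tw := l.reverse.takeWhile p with htwd
  set dw := l.reverse.dropWhile p with hdwd
  have hsplit : tw ++ dw = l.reverse := List.takeWhile_append_dropWhile
  have hl : l = dw.reverse ++ tw.reverse := by
    have := congrArg List.reverse hsplit
    simpa [List.reverse_append] using this.symm
  have hlen' : tw.length + dw.length = l.length := by
    have := congrArg List.length hsplit
    simpa using this
  have hn : l.length - tw.length = dw.reverse.length := by
    simp only [List.length_reverse]
    omega
  rw [hn, hl]
  exact List.drop_left

-- the whole pipeline, with the split result generalized to any field list
lemma at_main (s : List String) (h : ∀ v ∈ s, (PySem.Int.ofStr? v).isSome = true) :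
    (match PySem.List.pyGet? s 0 with
      | none => none
      | some s0 =>
        match PySem.Int.ofStr? s0 with
        | none => none
        | some t => atLoopA s t (PySem.List.pyRange ((s.length : Int) - 1) 0 (-1)) 0).getD 0
    = (match atParseAll s with
      | none => none
      | some vals =>
        match PySem.List.pyGet? vals 0 with
        | none => none
        | some t =>
          let diffs := (PySem.List.slice vals (some 1) none).map (fun v => v - t)
          let cut := (PySem.List.enumerate diffs).foldl
            (fun (c : Int) (p : Int × Int) => if p.2 ≤ 0 then p.1 + 1 else c) 0
          some ((PySem.List.slice diffs (some cut) none).foldl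
            (fun (acc : Int) (d : Int) => if d ≤ 900 then acc + 1 else acc) 0)).getD 0 := by
  rw [atParseAll_eq_some s h]
  cases s with
  | nil => rfl
  | cons s0 rest =>
    have h0 := h s0 (by simp)
    obtain ⟨t, ht⟩ := Option.isSome_iff_exists.mp h0
    have hget0 : PySem.List.pyGet? (s0 :: rest) (0 : Int) = some s0 := by
      rw [show (0 : Int) = ((0 : Nat) : Int) by norm_num, PySem.List.pyGet?_natCast]; rfl
    have hgetv : PySem.List.pyGet? ((s0 :: rest).map atVal) (0 : Int) = some (atVal s0) := by
      rw [show (0 : Int) = ((0 : Nat) : Int) by norm_num, PySem.List.pyGet?_natCast]; rfl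
    have hval0 : atVal s0 = t := by simp [atVal, ht]
    simp only [hget0, ht, hgetv, hval0]
    -- A side
    have hlen : ((s0 :: rest).length : Int) - 1 = ((rest.length : Nat) : Int) := by
      simp
    rw [hlen, atLoopA_eq s0 rest t (fun v hv => h v (by simp [hv])) rest.length le_rfl 0]
    -- B side: name the diff list
    set diffs := (rest.map atVal).map (fun v => v - t) with hdiffs
    have hslice1 : PySem.List.slice (atVal s0 :: rest.map atVal) (some 1) none
        = rest.map atVal := by
      rw [PySem.List.slice_from _ (by norm_num)]
      rfl
    simp only [List.map_cons]
    rw [hslice1, List.map_map]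
    have hcomp : (fun v => v - t) ∘ atVal = fun v => atVal v - t := rfl
    rw [hcomp]
    rw [atCut_eq (rest.map (fun v => atVal v - t))]
    rw [PySem.List.slice_from _ (by positivity)]
    rw [Int.toNat_natCast, atDrop_eq]
    rw [show (fun (acc : Int) (d : Int) => if d ≤ 900 then acc + 1 else acc)
        = (fun (acc : Int) (d : Int) => if decide (d ≤ 900) = true then acc + 1 else acc) from by
      funext acc d; simp]
    rw [PySem.List.foldl_count_if (fun d => decide (d ≤ 900))]
    rw [show List.take rest.length (List.map (fun v => atVal v - t) rest)
        = List.map (fun v => atVal v - t) rest from by simp]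
    rw [atCount_spec, List.countP_reverse]

-- ===== VERDICT (by name: the statement is the Claim_ definition above) =====
theorem after_times_spec : Claim_equal_after_times := by
  intro x _ hpre
  unfold Spec_after_times after_times after_times_alt after_timesAux after_timesAltAux
  exact at_main _ hpre
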